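-- pv_equiv track=rewrite | github.com/shuakabane/stelftools | func_ident.py | get_func_name_list_alias_list
-- ===== SOURCE A (Python) =====
-- def get_func_name_list_alias_list(multi_func_name_list, alias_list):
--     func_name_alias_list = []
--     for multi_func_name in multi_func_name_list:
--         for alias in alias_list:
--             if multi_func_name in alias:
--                 func_name_alias_list.extend(alias)
--     if func_name_alias_list == []:
--         func_name_alias_list = multi_func_name_list
--     return sorted(set(func_name_alias_list))
-- ===== SOURCE B (Python) =====
-- def get_func_name_list_alias_list(multi_func_name_list, alias_list):
--     # One pass over alias_list with hash-set membership instead of A's nested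
--     # name x alias scan: collect every alias group that contains any queried name.
--     names = set(multi_func_name_list)
--     collected = set()
--     for alias in alias_list:
--         if not names.isdisjoint(alias):
--             collected.update(alias)
--     if collected:
--         return sorted(collected)
--     return sorted(names)
-- ===== Notes on version B (the rewrite author's own statement) =====
-- stated objective: faster
-- what changed: Single pass over alias_list with a hash set of the queried names (set.isdisjoint test) replaces A's nested names-by-aliases scan with linear list membership, and the result set is accumulated directly instead of an ever-growing list.
import Mathlib
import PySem

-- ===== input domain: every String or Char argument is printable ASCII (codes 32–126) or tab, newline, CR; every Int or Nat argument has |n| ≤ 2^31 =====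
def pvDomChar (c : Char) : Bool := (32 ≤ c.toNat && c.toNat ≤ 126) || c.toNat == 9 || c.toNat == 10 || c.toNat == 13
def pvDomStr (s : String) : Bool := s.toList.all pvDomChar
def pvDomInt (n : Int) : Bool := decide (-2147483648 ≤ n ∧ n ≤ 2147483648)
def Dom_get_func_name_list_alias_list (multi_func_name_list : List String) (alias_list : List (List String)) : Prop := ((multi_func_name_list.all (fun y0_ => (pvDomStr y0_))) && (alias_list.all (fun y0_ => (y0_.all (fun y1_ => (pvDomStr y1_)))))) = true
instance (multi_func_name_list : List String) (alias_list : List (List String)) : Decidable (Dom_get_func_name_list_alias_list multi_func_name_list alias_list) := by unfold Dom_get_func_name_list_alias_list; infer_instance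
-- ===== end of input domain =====

-- B replaces A's nested names-by-aliases scan with one pass over alias_list using a set of names (faster; result-value equivalence proved below).

-- ===== PORT A =====
def get_func_name_list_alias_list (multi_func_name_list : List String) (alias_list : List (List String)) : List String :=
  let func_name_alias_list : List String :=
    multi_func_name_list.foldl (fun acc multi_func_name =>
      alias_list.foldl (fun acc al =>
        if multi_func_name ∈ al then acc ++ al else acc) acc) []
  let func_name_alias_list :=
    if func_name_alias_list = [] then multi_func_name_list else func_name_alias_list
  PySem.List.sorted (PySem.Set.ofList func_name_alias_list) (fun x => x) false

-- ===== PORT B =====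
def get_func_name_list_alias_list_alt (multi_func_name_list : List String) (alias_list : List (List String)) : List String :=
  let names : PySem.Set String := PySem.Set.ofList multi_func_name_list
  let collected : PySem.Set String :=
    alias_list.foldl (fun s al =>
      if PySem.Set.isdisjoint names al = false then PySem.Set.update s al else s)
      PySem.Set.empty
  if collected ≠ [] then PySem.List.sorted collected (fun x => x) false
  else PySem.List.sorted names (fun x => x) false

-- ===== PRECONDITION & SPEC =====
def Spec_get_func_name_list_alias_list (multi_func_name_list : List String) (alias_list : List (List String)) (out : List String) : Prop := out = get_func_name_list_alias_list_alt multi_func_name_list alias_list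
instance (multi_func_name_list : List String) (alias_list : List (List String)) (out : List String) : Decidable (Spec_get_func_name_list_alias_list multi_func_name_list alias_list out) := by unfold Spec_get_func_name_list_alias_list; infer_instance

-- ===== CLAIM (what is proved, stated in full; the proofs are below) =====
def Claim_equal_get_func_name_list_alias_list : Prop := ∀ (multi_func_name_list : List String) (alias_list : List (List String)), Dom_get_func_name_list_alias_list multi_func_name_list alias_list → Spec_get_func_name_list_alias_list multi_func_name_list alias_list (get_func_name_list_alias_list multi_func_name_list alias_list)

-- ===== LEMMAS AND PROOFS =====

-- Membership in A's inner loop over alias_list (one fixed name).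
theorem memInner (n x : String) (als : List (List String)) (acc0 : List String) :
    x ∈ als.foldl (fun acc al => if n ∈ al then acc ++ al else acc) acc0 ↔
      x ∈ acc0 ∨ ∃ a ∈ als, n ∈ a ∧ x ∈ a := by
  induction als generalizing acc0 with
  | nil => simp
  | cons a as ih =>
    simp only [List.foldl_cons, ih]
    by_cases h : n ∈ a <;> simp [h] <;> tauto

-- Membership in A's full accumulation.
theorem memA (x : String) (names : List String) (als : List (List String)) (acc0 : List String) :
    x ∈ names.foldl (fun acc n =>
        als.foldl (fun acc al => if n ∈ al then acc ++ al else acc) acc) acc0 ↔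
      x ∈ acc0 ∨ ∃ n ∈ names, ∃ a ∈ als, n ∈ a ∧ x ∈ a := by
  induction names generalizing acc0 with
  | nil => simp
  | cons n ns ih =>
    simp only [List.foldl_cons, ih, memInner]
    aesop

-- Membership in B's collected set.
theorem memB (x : String) (names : PySem.Set String) (als : List (List String)) (s0 : PySem.Set String) :
    x ∈ als.foldl (fun s al =>
        if PySem.Set.isdisjoint names al = false then PySem.Set.update s al else s) s0 ↔
      x ∈ s0 ∨ ∃ a ∈ als, (∃ n ∈ names, n ∈ a) ∧ x ∈ a := by
  induction als generalizing s0 with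
  | nil => simp
  | cons a as ih =>
    simp only [List.foldl_cons]
    by_cases h : PySem.Set.isdisjoint names a = false
    · rw [if_pos h, ih]
      have hmem : ∃ n ∈ names, n ∈ a := by
        by_contra hc
        push Not at hc
        exact (Bool.eq_false_iff.mp h) ((PySem.Set.isdisjoint_iff _ _).mpr hc)
      constructor
      · rintro (hx | ⟨b, hb, hn, hxb⟩)
        · rcases (PySem.Set.mem_update _ _ _).mp hx with hx | hx
          · exact Or.inl hx
          · exact Or.inr ⟨a, List.mem_cons_self, hmem, hx⟩
        · exact Or.inr ⟨b, List.mem_cons_of_mem _ hb, hn, hxb⟩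
      · rintro (hx | ⟨b, hb, hn, hxb⟩)
        · exact Or.inl ((PySem.Set.mem_update _ _ _).mpr (Or.inl hx))
        · rcases List.mem_cons.mp hb with rfl | hb'
          · exact Or.inl ((PySem.Set.mem_update _ _ _).mpr (Or.inr hxb))
          · exact Or.inr ⟨b, hb', hn, hxb⟩
    · have h' : PySem.Set.isdisjoint names a = true := by
        cases hb : PySem.Set.isdisjoint names a
        · exact absurd hb h
        · rfl
      have hno : ∀ n ∈ names, n ∉ a := (PySem.Set.isdisjoint_iff _ _).mp h'
      rw [if_neg h, ih]
      constructor
      · rintro (hx | ⟨b, hb, hn, hxb⟩)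
        · exact Or.inl hx
        · exact Or.inr ⟨b, List.mem_cons_of_mem _ hb, hn, hxb⟩
      · rintro (hx | ⟨b, hb, ⟨n, hn, hna⟩, hxb⟩)
        · exact Or.inl hx
        · rcases List.mem_cons.mp hb with rfl | hb'
          · exact absurd hna (hno n hn)
          · exact Or.inr ⟨b, hb', ⟨n, hn, hna⟩, hxb⟩

-- B's collected set is duplicate-free.
theorem nodupB (names : PySem.Set String) (als : List (List String)) (s0 : PySem.Set String)
    (h0 : s0.Nodup) :
    (als.foldl (fun s al =>
        if PySem.Set.isdisjoint names al = false then PySem.Set.update s al else s) s0).Nodup := by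
  induction als generalizing s0 with
  | nil => exact h0
  | cons a as ih =>
    simp only [List.foldl_cons]
    split
    · exact ih _ (PySem.Set.nodup_update _ _ h0)
    · exact ih _ h0

-- ===== VERDICT (by name: the statement is the Claim_ definition above) =====
theorem get_func_name_list_alias_list_spec : Claim_equal_get_func_name_list_alias_list := by
  intro names als _
  unfold Spec_get_func_name_list_alias_list get_func_name_list_alias_list get_func_name_list_alias_list_alt
  simp only []
  set accA := names.foldl (fun acc n =>
      als.foldl (fun acc al => if n ∈ al then acc ++ al else acc) acc) [] with hacc
  set col := als.foldl (fun s al =>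
      if PySem.Set.isdisjoint (PySem.Set.ofList names) al = false then PySem.Set.update s al
      else s) PySem.Set.empty with hcol
  have hmatch : accA ≠ [] ↔ col ≠ [] := by
    have hA : ∀ x, x ∈ accA ↔ ∃ n ∈ names, ∃ a ∈ als, n ∈ a ∧ x ∈ a := by
      intro x; rw [hacc, memA]; simp
    have hB : ∀ x, x ∈ col ↔ ∃ a ∈ als, (∃ n ∈ names, n ∈ a) ∧ x ∈ a := by
      intro x; rw [hcol, memB]
      simp [PySem.Set.mem_ofList]
    constructor
    · intro h
      rcases List.exists_mem_of_ne_nil _ h with ⟨x, hx⟩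
      rcases (hA x).mp hx with ⟨n, hn, a, ha, hna, hxa⟩
      intro hc
      have : x ∈ col := (hB x).mpr ⟨a, ha, ⟨n, hn, hna⟩, hxa⟩
      simp [hc] at this
    · intro h
      rcases List.exists_mem_of_ne_nil _ h with ⟨x, hx⟩
      rcases (hB x).mp hx with ⟨a, ha, ⟨n, hn, hna⟩, hxa⟩
      intro hc
      have : x ∈ accA := (hA x).mpr ⟨n, hn, a, ha, hna, hxa⟩
      simp [hc] at this
  by_cases hempty : accA = []
  · have hcolnil : ¬ col ≠ [] := fun h => (hmatch.mpr h) hempty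
    simp [hempty, hcolnil]
  · have hcolne : col ≠ [] := hmatch.mp hempty
    simp only [if_neg hempty, if_pos hcolne]
    apply (PySem.List.sorted_id_eq_sorted_id_iff_perm _ _).mpr
    apply (List.perm_ext_iff_of_nodup (PySem.Set.nodup_ofList _) (nodupB _ _ _ (List.nodup_nil))).mpr
    intro x
    rw [PySem.Set.mem_ofList, hacc, memA, memB]
    simp [PySem.Set.mem_ofList]
    tauto
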